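-- pv_equiv track=rewrite | github.com/TeeKay-FourTwentyOne/math | ramsey-book-graphs/verify_composite_equi_covariance.py | verify_theorem1
-- ===== SOURCE A (Python) =====
-- def verify_theorem1(m, D11, D12):
--     """Verify V1V2 auto-satisfaction (Theorem 1) for given construction.
--
--     V1V2 common neighbors at d = |D12| - [d in D12]
--     """
--     n = (m + 1) // 2
--     D11_set = set(D11)
--     D12_set = set(D12)
--     D22 = [x for x in range(1, m) if x not in D11_set]
--     D22_set = set(D22)
--
--     # Compute Sigma(D11, D12, d) = sum_{x in D11} [x+d in D12] for each d
--     # and Delta(D12, D12T, d) where D12T = {-x mod m : x in D12}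
--     D12T = set((m - x) % m for x in D12_set)
--
--     results = []
--     for d in range(m):
--         # V1V2 common neighbors: count x in Z_m such that
--         # (x - v1) in D11 and (x - v2) in D12 (or similar)
--         # Using the circulant structure:
--         # Sigma(D11, D12, d) = #{a in D11 : (a + d) mod m in D12}
--         sigma = sum(1 for a in D11 if (a + d) % m in D12_set)
--
--         # Expected: |D12| - [d in D12]
--         expected = len(D12) - (1 if d in D12_set else 0)
--
--         # For the auto-satisfaction to hold, we need the convolution identity
--         # This is the V1V2 cross-block common neighbor count
--         results.append((d, sigma, expected, sigma == expected))
--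
--     return results
-- ===== SOURCE B (Python) =====
-- def verify_theorem1(m, D11, D12):
--     """Same results as A, but sigma is precomputed for all offsets at once:
--     for each distinct b in D12 with 0 <= b < m and each a in D11, the pair
--     contributes to the single offset d = (b - a) % m."""
--     d12 = set(D12)
--     cnt = {}
--     for b in d12:
--         if 0 <= b < m:
--             for a in D11:
--                 k = (b - a) % m
--                 cnt[k] = cnt.get(k, 0) + 1
--     L = len(D12)
--     return [(d, cnt.get(d, 0), L - (1 if d in d12 else 0),
--              cnt.get(d, 0) == L - (1 if d in d12 else 0))
--             for d in range(m)]
-- ===== Notes on version B (the rewrite author's own statement) =====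
-- stated objective: faster
-- what changed: Instead of scanning all of D11 for every offset d in range(m), B makes one pass over the pairs (b,a) with b a distinct in-range element of D12 and a in D11, accumulating a count at offset (b-a) % m in a dictionary, then reads the count per d.
import Mathlib
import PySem

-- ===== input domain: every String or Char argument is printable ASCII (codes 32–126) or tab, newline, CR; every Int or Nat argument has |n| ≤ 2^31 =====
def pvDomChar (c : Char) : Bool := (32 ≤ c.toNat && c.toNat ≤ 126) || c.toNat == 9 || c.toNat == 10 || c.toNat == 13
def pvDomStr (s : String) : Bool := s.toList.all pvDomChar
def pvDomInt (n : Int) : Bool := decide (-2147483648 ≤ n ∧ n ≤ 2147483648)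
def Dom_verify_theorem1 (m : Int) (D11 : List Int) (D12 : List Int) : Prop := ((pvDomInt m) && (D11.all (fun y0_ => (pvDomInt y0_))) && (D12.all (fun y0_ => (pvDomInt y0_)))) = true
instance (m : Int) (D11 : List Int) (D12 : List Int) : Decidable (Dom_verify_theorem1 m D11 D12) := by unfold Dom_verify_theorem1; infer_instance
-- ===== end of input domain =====

-- B replaces the per-offset scan of D11 by a single accumulation over pairs (b, a)
-- at offset (b - a) % m; proved equal to A on all inputs where A returns.

-- ===== PORT A =====
def verify_theorem1 (m : Int) (D11 : List Int) (D12 : List Int) : List (Int × Int × Int × Bool) :=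
  let _n := PySem.Int.floordiv (m + 1) 2
  let D11_set : PySem.Set Int := PySem.Set.ofList D11
  let D12_set : PySem.Set Int := PySem.Set.ofList D12
  let D22 : List Int := (PySem.List.pyRange 1 m 1).filter (fun x => !(PySem.Set.contains D11_set x))
  let _D22_set : PySem.Set Int := PySem.Set.ofList D22
  let _D12T : PySem.Set Int := PySem.Set.ofList (D12_set.map (fun x => PySem.Int.mod (m - x) m))
  (PySem.List.pyRange 0 m 1).foldl (fun results d =>
    let sigma : Int := D11.foldl (fun s a =>
      if PySem.Set.contains D12_set (PySem.Int.mod (a + d) m) then s + 1 else s) 0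
    let expected : Int := (D12.length : Int) - (if PySem.Set.contains D12_set d then 1 else 0)
    results ++ [(d, sigma, expected, decide (sigma = expected))]) []

-- ===== PORT B =====
def verify_theorem1_alt (m : Int) (D11 : List Int) (D12 : List Int) : List (Int × Int × Int × Bool) :=
  let d12 : PySem.Set Int := PySem.Set.ofList D12
  let cnt : PySem.Dict Int Int := d12.foldl (fun cnt b =>
    if 0 ≤ b ∧ b < m then
      D11.foldl (fun cnt a => cnt.modify (PySem.Int.mod (b - a) m) 0 (· + 1)) cnt
    else cnt) PySem.Dict.empty
  let L : Int := (D12.length : Int)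
  (PySem.List.pyRange 0 m 1).map (fun d =>
    let s := cnt.getD d 0
    let e := L - (if PySem.Set.contains d12 d then 1 else 0)
    (d, s, e, decide (s = e)))

-- ===== PRECONDITION & SPEC =====
-- A raises ZeroDivisionError (building D12T) exactly when m = 0 and D12 is nonempty; Pre_ excludes only that.
def Pre_verify_theorem1 (m : Int) (D11 : List Int) (D12 : List Int) : Prop := m ≠ 0 ∨ D12 = []
instance (m : Int) (D11 : List Int) (D12 : List Int) : Decidable (Pre_verify_theorem1 m D11 D12) := by unfold Pre_verify_theorem1; infer_instance
def pvWitness_verify_theorem1 : Int × List Int × List Int := (5, [1, 2], [1, 3])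

def Spec_verify_theorem1 (m : Int) (D11 : List Int) (D12 : List Int) (out : List (Int × Int × Int × Bool)) : Prop := out = verify_theorem1_alt m D11 D12
instance (m : Int) (D11 : List Int) (D12 : List Int) (out : List (Int × Int × Int × Bool)) : Decidable (Spec_verify_theorem1 m D11 D12 out) := by unfold Spec_verify_theorem1; infer_instance

-- ===== CLAIM (what is proved, stated in full; the proofs are below) =====
def Claim_equal_verify_theorem1 : Prop := ∀ (m : Int) (D11 : List Int) (D12 : List Int), Dom_verify_theorem1 m D11 D12 → Pre_verify_theorem1 m D11 D12 → Spec_verify_theorem1 m D11 D12 (verify_theorem1 m D11 D12)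

-- ===== LEMMAS AND PROOFS =====

-- The count accumulated by B's nested loop at key d.
theorem cnt_getD (m : Int) (D11 : List Int) (bs : List Int) (c : PySem.Dict Int Int) (d : Int) :
    (bs.foldl (fun cnt b =>
      if 0 ≤ b ∧ b < m then
        D11.foldl (fun cnt a => cnt.modify (PySem.Int.mod (b - a) m) 0 (· + 1)) cnt
      else cnt) c).getD d 0
    = c.getD d 0 + ((bs.filter (fun b => decide (0 ≤ b ∧ b < m))).map
        (fun b => ((D11.map (fun a => PySem.Int.mod (b - a) m)).count d : Int))).sum := by
  induction bs generalizing c with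
  | nil => simp
  | cons b t ih =>
    simp only [List.foldl_cons, List.filter_cons]
    by_cases hb : 0 ≤ b ∧ b < m
    · rw [if_pos hb, ih]
      have : (D11.foldl (fun cnt a => cnt.modify (PySem.Int.mod (b - a) m) 0 (· + 1)) c).getD d 0
          = c.getD d 0 + ((D11.map (fun a => PySem.Int.mod (b - a) m)).count d : Int) := by
        rw [← List.foldl_map (f := fun a => PySem.Int.mod (b - a) m)
            (g := fun (cnt : PySem.Dict Int Int) x => cnt.modify x 0 (· + 1))]
        exact PySem.Dict.getD_foldl_modify_add_one _ _ _
      simp [hb, this]; ring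
    · rw [if_neg hb, ih]
      simp [hb]

-- For 0 ≤ d < m and 0 ≤ b < m:  (b - a) % m = d  ↔  b = (a + d) % m.
theorem key_eq_iff (m a b d : Int) (hm : 0 < m) (hb0 : 0 ≤ b) (hbm : b < m)
    (hd0 : 0 ≤ d) (hdm : d < m) :
    PySem.Int.mod (b - a) m = d ↔ b = PySem.Int.mod (a + d) m := by
  rw [PySem.Int.mod_eq_emod_of_pos hm, PySem.Int.mod_eq_emod_of_pos hm]
  constructor
  · intro h
    have h1 : (a + (b - a) % m) % m = b % m := by
      rw [Int.add_emod_emod]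
      norm_num
    rw [h, Int.emod_eq_of_lt hb0 hbm] at h1
    exact h1.symm
  · intro h
    subst h
    rw [Int.sub_emod, Int.emod_emod_of_dvd _ dvd_rfl, ← Int.sub_emod]
    have h2 : a + d - a = d := by ring
    rw [h2, Int.emod_eq_of_lt hd0 hdm]

-- A's per-offset scan equals B's accumulated count at d.
theorem sigma_eq (m : Int) (D11 D12 : List Int) (d : Int) (hm : 0 < m)
    (hd0 : 0 ≤ d) (hdm : d < m) :
    D11.foldl (fun s a =>
      if PySem.Set.contains (PySem.Set.ofList D12) (PySem.Int.mod (a + d) m) then s + 1 else s) (0 : Int)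
    = (((PySem.Set.ofList D12).filter (fun b => decide (0 ≤ b ∧ b < m))).map
        (fun b => ((D11.map (fun a => PySem.Int.mod (b - a) m)).count d : Int))).sum := by
  induction D11 with
  | nil => simp
  | cons a t ih =>
    rw [List.foldl_cons]
    have step : ∀ (init : Int), t.foldl (fun s a =>
        if PySem.Set.contains (PySem.Set.ofList D12) (PySem.Int.mod (a + d) m) then s + 1 else s) init
        = init + t.foldl (fun s a =>
        if PySem.Set.contains (PySem.Set.ofList D12) (PySem.Int.mod (a + d) m) then s + 1 else s) 0 := by
      intro init
      rw [PySem.List.foldl_if_add_one, PySem.List.foldl_if_add_one]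
      simp
    rw [step, ih]
    -- head contribution
    have hsum : ∀ (bs : List Int), bs.Nodup → (∀ b ∈ bs, 0 ≤ b ∧ b < m) →
        (bs.map (fun b => (((a :: t).map (fun x => PySem.Int.mod (b - x) m)).count d : Int))).sum
        = (if PySem.Int.mod (a + d) m ∈ bs then 1 else 0)
          + (bs.map (fun b => ((t.map (fun x => PySem.Int.mod (b - x) m)).count d : Int))).sum := by
      intro bs hnd hrange
      induction bs with
      | nil => simp
      | cons b bt ihb =>
        have hndt := hnd.of_cons
        have hb := hrange b (by simp)
        have hcount : (((a :: t).map (fun x => PySem.Int.mod (b - x) m)).count d : Int)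
            = (if PySem.Int.mod (b - a) m = d then 1 else 0)
              + ((t.map (fun x => PySem.Int.mod (b - x) m)).count d : Int) := by
          simp only [List.map_cons, List.count_cons]
          by_cases h : PySem.Int.mod (b - a) m = d
          · simp [h]; ring
          · simp [h]
        rw [List.map_cons, List.sum_cons, hcount,
            ihb hndt (fun x hx => hrange x (List.mem_cons_of_mem _ hx)), List.map_cons, List.sum_cons]
        have hiff := key_eq_iff m a b d hm hb.1 hb.2 hd0 hdm
        by_cases hmem : PySem.Int.mod (a + d) m = b
        · have hbnot : b ∉ bt := (List.nodup_cons.mp hnd).1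
          have : PySem.Int.mod (b - a) m = d := hiff.mpr hmem.symm
          simp [this, hmem, hbnot]; ring
        · have hne : ¬ PySem.Int.mod (b - a) m = d := fun h => hmem ((hiff.mp h).symm)
          simp only [hne, if_false, List.mem_cons]
          rw [if_congr (or_iff_right hmem) rfl rfl]
          ring
    set bs := (PySem.Set.ofList D12).filter (fun b => decide (0 ≤ b ∧ b < m)) with hbs
    have hnd : bs.Nodup := (PySem.Set.nodup_ofList D12).filter _
    have hrange : ∀ b ∈ bs, 0 ≤ b ∧ b < m := by
      intro b hbmem
      have := List.of_mem_filter hbmem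
      simpa using this
    rw [hsum bs hnd hrange]
    -- head indicator equals set membership test
    have hc : PySem.Int.mod (a + d) m ∈ bs
        ↔ PySem.Set.contains (PySem.Set.ofList D12) (PySem.Int.mod (a + d) m) = true := by
      rw [hbs, List.mem_filter]
      have h0 : 0 ≤ PySem.Int.mod (a + d) m := PySem.Int.mod_nonneg _ hm
      have h1 : PySem.Int.mod (a + d) m < m := PySem.Int.mod_lt _ hm
      simp [PySem.Set.contains, h0, h1]
    by_cases hin : PySem.Set.contains (PySem.Set.ofList D12) (PySem.Int.mod (a + d) m) = true
    · rw [if_pos hin, if_pos (hc.mpr hin)]; norm_num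
    · rw [if_neg hin, if_neg (fun h => hin (hc.mp h))]

-- ===== VERDICT (by name: the statement is the Claim_ definition above) =====
theorem verify_theorem1_spec : Claim_equal_verify_theorem1 := by
  intro m D11 D12 _ _
  show verify_theorem1 m D11 D12 = verify_theorem1_alt m D11 D12
  unfold verify_theorem1 verify_theorem1_alt
  simp only []
  rw [PySem.List.foldl_append_singleton_eq_map, List.nil_append]
  by_cases hm : 0 < m
  · apply List.map_congr_left
    intro d hd
    have hdr := (PySem.List.mem_pyRange_one).mp hd
    have hfold : ((PySem.Set.ofList D12).foldl (fun cnt b =>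
        if 0 ≤ b ∧ b < m then
          D11.foldl (fun cnt a => cnt.modify (PySem.Int.mod (b - a) m) 0 (· + 1)) cnt
        else cnt) PySem.Dict.empty).getD d 0
        = (((PySem.Set.ofList D12).filter (fun b => decide (0 ≤ b ∧ b < m))).map
            (fun b => ((D11.map (fun a => PySem.Int.mod (b - a) m)).count d : Int))).sum := by
      rw [cnt_getD]; simp
    rw [hfold, ← sigma_eq m D11 D12 d hm hdr.1 hdr.2]
  · rw [PySem.List.pyRange_one_eq_nil (by omega)]
    simp
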